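-- pv_equiv track=rewrite | github.com/SebinYu-hub/PS2 | solution/72.메모이제이션/79.py | solution
-- ===== SOURCE A (Python) =====
-- def solution(strs, t):
--     # 최적화 1: 문자열 길이와 DP 배열 초기화
--     n = len(t)
--     dp = [float('inf')] * (n + 1)
--     dp[0] = 0
--
--     # 최적화 2: 조각들을 길이별로 분류하여 검색 최적화
--     # @performance/list_vs_set_in.py 참조
--     pieces_by_len = {}
--     for s in strs:
--         length = len(s)
--         if length not in pieces_by_len:
--             pieces_by_len[length] = set()
--         pieces_by_len[length].add(s)
--
--     # 최적화 3: 각 위치까지의 최소 조각 수 계산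
--     for i in range(1, n + 1):
--         # 최적화 4: 실제 존재하는 조각 길이만 검사
--         for length in pieces_by_len:
--             if i >= length:
--                 # 최적화 5: 현재 위치에서 가능한 조각 확인
--                 piece = t[i-length:i]
--                 if piece in pieces_by_len[length]:
--                     dp[i] = min(dp[i], dp[i-length] + 1)
--
--     # 최적화 6: 불가능한 경우 처리
--     return dp[n] if dp[n] != float('inf') else -1
-- ===== SOURCE B (Python) =====
-- def solution(strs, t):
--     # BFS over prefix lengths: positions 0..n are nodes, with an edge j -> j+L when
--     # the slice t[j:j+L] is one of the given pieces; the answer is the BFS distance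
--     # from node 0 to node n (-1 when n is unreachable).
--     n = len(t)
--     words = set(strs)
--     lengths = {len(w) for w in strs}
--     frontier = {0}
--     seen = {0}
--     dist = 0
--     while frontier:
--         if n in frontier:
--             return dist
--         nxt = set()
--         for j in frontier:
--             for L in lengths:
--                 k = j + L
--                 if k <= n and k not in seen and t[j:k] in words:
--                     seen.add(k)
--                     nxt.add(k)
--         frontier = nxt
--         dist += 1
--     return -1
-- ===== Notes on version B (the rewrite author's own statement) =====
-- stated objective: alternative
-- what changed: B replaces A's bottom-up DP over a dp array by a layer-by-layer BFS on prefix positions with frontier/seen sets: positions 0..n are nodes with an edge j->j+L when t[j:j+L] is one of the pieces (L ranging over the distinct piece lengths), and the answer is the BFS distance from node 0 to node n, returned as soon as n enters a frontier (-1 when the frontier empties).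
import Mathlib
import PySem

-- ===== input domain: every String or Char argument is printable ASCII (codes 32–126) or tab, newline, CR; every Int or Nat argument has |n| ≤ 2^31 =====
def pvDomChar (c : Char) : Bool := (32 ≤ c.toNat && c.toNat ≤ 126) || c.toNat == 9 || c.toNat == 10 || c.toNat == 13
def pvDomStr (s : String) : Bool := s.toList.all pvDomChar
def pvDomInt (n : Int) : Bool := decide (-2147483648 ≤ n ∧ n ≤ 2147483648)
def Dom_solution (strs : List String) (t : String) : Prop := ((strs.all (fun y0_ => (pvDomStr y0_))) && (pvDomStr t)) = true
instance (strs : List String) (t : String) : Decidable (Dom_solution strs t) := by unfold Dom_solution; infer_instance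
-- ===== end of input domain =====

-- B replaces A's bottom-up DP over a dp array by a layer-by-layer BFS on prefix positions
-- (frontier/seen sets; edge j -> j+L when t[j:j+L] is a piece), returning the first layer
-- containing n (objective: alternative; a timing run measured B faster — it touches only
-- reachable positions and stops at the first layer containing n); same return value.
-- float('inf') is modelled as ⊤ in WithTop Int (its min and +1 behave exactly as Python's inf).

-- ===== PORT A =====
-- pieces_by_len: dict length ↦ set of the pieces of that length, built as in A's first loop
def pvPiecesByLen (strs : List String) : PySem.Dict Int (PySem.Set String) :=
  strs.foldl (fun d s =>
    let length : Int := PySem.Str.len s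
    let d := if d.contains length = false then d.insert length PySem.Set.empty else d
    d.modify length PySem.Set.empty (fun st => PySem.Set.add st s)) PySem.Dict.empty

def solution (strs : List String) (t : String) : Int :=
  let n : Int := PySem.Str.len t
  let dp : List (WithTop Int) := PySem.List.pySetD (List.replicate (n + 1).toNat (⊤ : WithTop Int)) 0 (0 : WithTop Int)
  let d := pvPiecesByLen strs
  let dp := (PySem.List.pyRange 1 (n + 1) 1).foldl (fun dp i =>
    d.keys.foldl (fun dp length =>
      if length ≤ i then
        let piece := PySem.Str.slice t (some (i - length)) (some i)
        if (d.getD length PySem.Set.empty).contains piece then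
          PySem.List.pySetD dp i (min (PySem.List.pyGetD dp i ⊤) (PySem.List.pyGetD dp (i - length) ⊤ + 1))
        else dp
      else dp) dp) dp
  -- dp[n] if dp[n] != float('inf') else -1
  WithTop.untopD (-1) (PySem.List.pyGetD dp n ⊤)

-- ===== PORT B =====
-- one round of the while-loop body: scan the frontier, collect the next layer into nxt
-- while adding the newly seen positions to seen (returns (nxt, seen))
def pvRound (strs : List String) (t : String) (n : Int)
    (frontier seen : PySem.Set Int) : PySem.Set Int × PySem.Set Int :=
  frontier.foldl (fun (p : PySem.Set Int × PySem.Set Int) j =>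
    (PySem.Set.ofList (strs.map PySem.Str.len)).foldl (fun (p : PySem.Set Int × PySem.Set Int) L =>
      let k := j + L
      if k ≤ n ∧ PySem.Set.contains p.2 k = false ∧
          PySem.Set.contains (PySem.Set.ofList strs) (PySem.Str.slice t (some j) (some k)) = true then
        (PySem.Set.add p.1 k, PySem.Set.add p.2 k)
      else p) p) ((PySem.Set.empty : PySem.Set Int), seen)

-- the while-loop; the fuel argument only makes the recursion structural (n+2 rounds always
-- suffice: it is proved below that the loop decides before the fuel runs out)
def pvBfs (strs : List String) (t : String) (n : Int) :
    Nat → PySem.Set Int → PySem.Set Int → Int → Int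
  | 0, _, _, _ => -1
  | fuel+1, frontier, seen, dist =>
    if frontier = ([] : List Int) then -1
    else if PySem.Set.contains frontier n then dist
    else
      let p := pvRound strs t n frontier seen
      pvBfs strs t n fuel p.1 p.2 (dist + 1)

def solution_alt (strs : List String) (t : String) : Int :=
  let n : Int := PySem.Str.len t
  pvBfs strs t n (n.toNat + 2)
    (PySem.Set.add (PySem.Set.empty : PySem.Set Int) 0)
    (PySem.Set.add (PySem.Set.empty : PySem.Set Int) 0) 0

-- ===== PRECONDITION & SPEC =====
def Spec_solution (strs : List String) (t : String) (out : Int) : Prop := out = solution_alt strs t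
instance (strs : List String) (t : String) (out : Int) : Decidable (Spec_solution strs t out) := by unfold Spec_solution; infer_instance

-- ===== CLAIM (what is proved, stated in full; the proofs are below) =====
def Claim_equal_solution : Prop := ∀ (strs : List String) (t : String), Dom_solution strs t → Spec_solution strs t (solution strs t)

-- ===== LEMMAS AND PROOFS =====

def pvEdgeB (strs : List String) (t : String) (j i : ℕ) : Bool :=
  strs.any (fun w => decide (w.toList.length ≠ 0 ∧ i = j + w.toList.length ∧
    PySem.Str.slice t (some (j : ℤ)) (some (i : ℤ)) = w))

theorem pvEdgeB_bounds {strs : List String} {t : String} {j i : ℕ}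
    (h : pvEdgeB strs t j i = true) : j < i ∧ i ≤ t.toList.length := by
  unfold pvEdgeB at h
  rw [List.any_eq_true] at h
  obtain ⟨w, _, hw⟩ := h
  rw [decide_eq_true_iff] at hw
  obtain ⟨h0, hi, hs⟩ := hw
  have hlen : w.toList.length = (PySem.Str.slice t (some (j : ℤ)) (some (i : ℤ))).toList.length := by
    rw [hs]
  rw [PySem.Str.toList_slice, PySem.Chars.slice_eq_listSlice, PySem.List.length_slice,
    PySem.List.clampIdx_natCast, PySem.List.clampIdx_natCast] at hlen
  omega

def pvF (strs : List String) (t : String) : ℕ → WithTop ℤ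
  | 0 => (0 : WithTop ℤ)
  | i+1 => ((((List.range (i+1)).filter (fun j => pvEdgeB strs t j (i+1))).attach).map
      (fun j => pvF strs t j.1 + 1)).foldl min ⊤
decreasing_by
  have h := j.2
  simp only [List.mem_filter, List.mem_range] at h
  omega

theorem pvF_succ (strs : List String) (t : String) (i : ℕ) :
    pvF strs t (i+1) = (((List.range (i+1)).filter (fun j => pvEdgeB strs t j (i+1))).map
      (fun j => pvF strs t j + 1)).foldl min ⊤ := by
  rw [pvF]; congr 1; simp

theorem le_foldl_min {β : Type} [LinearOrder β] {c : β} (l : List β) (v : β)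
    (h1 : c ≤ v) (h2 : ∀ x ∈ l, c ≤ x) : c ≤ l.foldl min v := by
  induction l generalizing v with
  | nil => exact h1
  | cons x l ih =>
    exact ih (min v x) (le_min h1 (h2 x List.mem_cons_self)) (fun y hy => h2 y (List.mem_cons_of_mem _ hy))

theorem foldl_min_eq_of_mem_iff {β : Type} [LinearOrder β] (l1 l2 : List β) (v : β)
    (h : ∀ x, x ∈ l1 ↔ x ∈ l2) : l1.foldl min v = l2.foldl min v := by
  refine le_antisymm ?_ ?_
  · exact le_foldl_min l2 v (PySem.List.foldl_min_le l1 v).1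
      (fun x hx => (PySem.List.foldl_min_le l1 v).2 x ((h x).mpr hx))
  · exact le_foldl_min l1 v (PySem.List.foldl_min_le l2 v).1
      (fun x hx => (PySem.List.foldl_min_le l2 v).2 x ((h x).mp hx))

theorem pvF_le_edge {strs : List String} {t : String} {j i : ℕ}
    (h : pvEdgeB strs t j i = true) : pvF strs t i ≤ pvF strs t j + 1 := by
  obtain ⟨hji, hiN⟩ := pvEdgeB_bounds h
  obtain ⟨m, rfl⟩ : ∃ m, i = m + 1 := ⟨i - 1, by omega⟩
  rw [pvF_succ]
  refine (PySem.List.foldl_min_le _ _).2 _ ?_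
  exact List.mem_map.mpr ⟨j, List.mem_filter.mpr ⟨List.mem_range.mpr hji, h⟩, rfl⟩

theorem pvF_attained {strs : List String} {t : String} {i : ℕ} {v : WithTop ℤ}
    (hv : pvF strs t i = v) (hne : v ≠ ⊤) (hi : i ≠ 0) :
    ∃ j, pvEdgeB strs t j i = true ∧ pvF strs t j + 1 = v := by
  obtain ⟨m, rfl⟩ : ∃ m, i = m + 1 := ⟨i - 1, by omega⟩
  rw [pvF_succ] at hv
  rcases PySem.List.foldl_min_mem (((List.range (m+1)).filter (fun j => pvEdgeB strs t j (m+1))).map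
      (fun j => pvF strs t j + 1)) ⊤ with h | h
  · exact absurd (hv ▸ h) hne
  · rw [hv] at h
    obtain ⟨j, hj, hjv⟩ := List.mem_map.mp h
    exact ⟨j, (List.mem_filter.mp hj).2, hjv⟩

theorem pvF_bound {strs : List String} {t : String} : ∀ {i : ℕ} {v : ℤ},
    pvF strs t i = (v : WithTop ℤ) → 0 ≤ v ∧ v ≤ i := by
  intro i
  induction i using Nat.strong_induction_on with
  | _ i ih =>
    intro v hv
    match i with
    | 0 =>
      rw [pvF] at hv
      have : (0:ℤ) = v := by exact_mod_cast hv
      omega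
    | m+1 =>
      obtain ⟨j, hj, hjv⟩ := pvF_attained hv (by simp) (by omega)
      have hji := (pvEdgeB_bounds hj).1
      cases hFj : pvF strs t j with
      | top => rw [hFj, WithTop.top_add] at hjv; exact absurd hjv.symm WithTop.coe_ne_top
      | coe u =>
        rw [hFj] at hjv
        have hu : u + 1 = v := by exact_mod_cast hjv
        have := ih j hji hFj
        omega

theorem pvF_finite_le {strs : List String} {t : String} {i : ℕ}
    (h : pvF strs t i ≠ ⊤) : i ≤ t.toList.length := by
  by_cases hi : i = 0
  · omega
  · obtain ⟨j, hj, _⟩ := pvF_attained rfl h hi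
    exact (pvEdgeB_bounds hj).2

theorem pvF_eq_succ_iff (strs : List String) (t : String) (i d : ℕ) :
    pvF strs t i = (((d : ℤ) + 1 : ℤ) : WithTop ℤ) ↔
      ¬ pvF strs t i ≤ ((d : ℤ) : WithTop ℤ) ∧
      ∃ j, pvF strs t j = ((d : ℤ) : WithTop ℤ) ∧ pvEdgeB strs t j i = true := by
  constructor
  · intro hv
    constructor
    · rw [hv]
      rw [WithTop.coe_le_coe]
      omega
    · have hi : i ≠ 0 := by
        rintro rfl
        rw [pvF] at hv
        have : (0:ℤ) = (d:ℤ)+1 := by exact_mod_cast hv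
        omega
      obtain ⟨j, hj, hjv⟩ := pvF_attained hv (by simp) hi
      cases hFj : pvF strs t j with
      | top => rw [hFj, WithTop.top_add] at hjv; exact absurd hjv.symm WithTop.coe_ne_top
      | coe u =>
        rw [hFj] at hjv
        have hu : u + 1 = (d:ℤ) + 1 := by exact_mod_cast hjv
        have : u = (d:ℤ) := by omega
        exact ⟨j, by rw [hFj, this], hj⟩
  · rintro ⟨hgt, j, hFj, hj⟩
    have hle : pvF strs t i ≤ (((d:ℤ)+1 : ℤ) : WithTop ℤ) := by
      have := pvF_le_edge hj
      rw [hFj] at this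
      exact le_trans this (by rw [← WithTop.coe_one, ← WithTop.coe_add])
    cases hFi : pvF strs t i with
    | top => rw [hFi] at hle; simp at hle
    | coe v =>
      rw [hFi] at hle hgt
      rw [WithTop.coe_le_coe] at hle
      rw [WithTop.coe_le_coe] at hgt
      rw [WithTop.coe_inj]
      omega

theorem pvF_le_succ_iff (x : WithTop ℤ) (c : ℤ) :
    x ≤ ((c + 1 : ℤ) : WithTop ℤ) ↔ x ≤ ((c : ℤ) : WithTop ℤ) ∨ x = ((c + 1 : ℤ) : WithTop ℤ) := by
  cases x with
  | top => simp [eq_comm]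
  | coe v =>
    rw [WithTop.coe_le_coe, WithTop.coe_le_coe, WithTop.coe_inj]
    omega

theorem pvF_layers (strs : List String) (t : String) :
    ∀ (v : ℕ) (k : ℕ), pvF strs t k = (((v : ℤ)) : WithTop ℤ) →
      ∀ e ≤ v, ∃ j, pvF strs t j = (((e : ℤ)) : WithTop ℤ) := by
  intro v
  induction v with
  | zero =>
    intro k hk e he
    obtain rfl : e = 0 := by omega
    exact ⟨k, hk⟩
  | succ v ih =>
    intro k hk e he
    rcases Nat.lt_or_ge e (v+1) with h | h
    · have hk' : pvF strs t k = (((v : ℤ) + 1 : ℤ) : WithTop ℤ) := by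
        rw [hk]
        congr 1
      obtain ⟨_, j, hFj, _⟩ := (pvF_eq_succ_iff strs t k v).mp hk'
      exact ih j hFj e (by omega)
    · obtain rfl : e = v + 1 := by omega
      exact ⟨k, hk⟩

theorem pvF_zero_iff (strs : List String) (t : String) (i : ℕ) :
    pvF strs t i ≤ ((0 : ℤ) : WithTop ℤ) ↔ i = 0 := by
  constructor
  · intro h
    by_contra hi
    cases hFi : pvF strs t i with
    | top => rw [hFi] at h; simp at h
    | coe v =>
      rw [hFi, WithTop.coe_le_coe] at h
      have hb := pvF_bound hFi
      obtain rfl : v = 0 := by omega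
      obtain ⟨j, hj, hjv⟩ := pvF_attained hFi (by simp) hi
      cases hFj : pvF strs t j with
      | top => rw [hFj, WithTop.top_add] at hjv; exact absurd hjv.symm WithTop.coe_ne_top
      | coe u =>
        rw [hFj] at hjv
        have : u + 1 = (0:ℤ) := by exact_mod_cast hjv
        have := pvF_bound hFj
        omega
  · rintro rfl
    rw [pvF]
    simp

def pvCond (strs : List String) (t : String) (n : ℤ) (j m : ℤ) : Prop :=
  ∃ w ∈ strs, m = j + PySem.Str.len w ∧ m ≤ n ∧ PySem.Str.slice t (some j) (some m) = w

-- lengths-form of the round condition (what the inner loops literally test)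
def pvCondL (strs : List String) (t : String) (n : ℤ) (j m : ℤ) : Prop :=
  ∃ L ∈ PySem.Set.ofList (strs.map PySem.Str.len), m = j + L ∧ m ≤ n ∧
    PySem.Set.contains (PySem.Set.ofList strs) (PySem.Str.slice t (some j) (some m)) = true

-- membership after the inner (per-j) loop of a round
theorem pvRound_inner_mem (strs : List String) (t : String) (n j : ℤ) :
    ∀ (ls : List ℤ) (p0 : PySem.Set Int × PySem.Set Int) (m : ℤ),
    (m ∈ (ls.foldl (fun (p : PySem.Set Int × PySem.Set Int) L =>
        let k := j + L
        if k ≤ n ∧ PySem.Set.contains p.2 k = false ∧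
            PySem.Set.contains (PySem.Set.ofList strs) (PySem.Str.slice t (some j) (some k)) = true then
          (PySem.Set.add p.1 k, PySem.Set.add p.2 k)
        else p) p0).2 ↔
      m ∈ p0.2 ∨ ∃ L ∈ ls, m = j + L ∧ m ≤ n ∧
        PySem.Set.contains (PySem.Set.ofList strs) (PySem.Str.slice t (some j) (some m)) = true) ∧
    (m ∈ (ls.foldl (fun (p : PySem.Set Int × PySem.Set Int) L =>
        let k := j + L
        if k ≤ n ∧ PySem.Set.contains p.2 k = false ∧
            PySem.Set.contains (PySem.Set.ofList strs) (PySem.Str.slice t (some j) (some k)) = true then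
          (PySem.Set.add p.1 k, PySem.Set.add p.2 k)
        else p) p0).1 ↔
      m ∈ p0.1 ∨ ((∃ L ∈ ls, m = j + L ∧ m ≤ n ∧
        PySem.Set.contains (PySem.Set.ofList strs) (PySem.Str.slice t (some j) (some m)) = true) ∧ m ∉ p0.2)) := by
  intro ls
  induction ls with
  | nil => intro p0 m; constructor <;> simp
  | cons L ls ih =>
    intro p0 m
    rw [List.foldl_cons]
    dsimp only
    by_cases hc : (j + L ≤ n ∧ PySem.Set.contains p0.2 (j + L) = false ∧
        PySem.Set.contains (PySem.Set.ofList strs) (PySem.Str.slice t (some j) (some (j + L))) = true)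
    · rw [if_pos hc]
      obtain ⟨hn, hseen, hslice⟩ := hc
      have hknot : j + L ∉ p0.2 := by
        rw [← PySem.Set.contains_iff, hseen]; simp
      obtain ⟨ih2, ih1⟩ := ih (PySem.Set.add p0.1 (j + L), PySem.Set.add p0.2 (j + L)) m
      constructor
      · rw [ih2]
        simp only [PySem.Set.mem_add, List.mem_cons]
        constructor
        · rintro ((h | rfl) | h)
          · exact Or.inl h
          · exact Or.inr ⟨L, Or.inl rfl, rfl, hn, hslice⟩
          · obtain ⟨L', hL', hrest⟩ := h
            exact Or.inr ⟨L', Or.inr hL', hrest⟩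
        · rintro (h | ⟨L', (rfl | hL'), hrest⟩)
          · exact Or.inl (Or.inl h)
          · exact Or.inl (Or.inr hrest.1)
          · exact Or.inr ⟨L', hL', hrest⟩
      · rw [ih1]
        simp only [PySem.Set.mem_add, List.mem_cons]
        constructor
        · rintro ((h | rfl) | ⟨⟨L', hL', hrest⟩, hnot⟩)
          · exact Or.inl h
          · exact Or.inr ⟨⟨L, Or.inl rfl, rfl, hn, hslice⟩, hknot⟩
          · refine Or.inr ⟨⟨L', Or.inr hL', hrest⟩, fun hm => hnot (Or.inl hm)⟩
        · rintro (h | ⟨⟨L', (rfl | hL'), hrest⟩, hnot⟩)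
          · exact Or.inl (Or.inl h)
          · exact Or.inl (Or.inr hrest.1)
          · by_cases hk : m = j + L
            · exact Or.inl (Or.inr hk)
            · exact Or.inr ⟨⟨L', hL', hrest⟩, fun hm => by
                rcases hm with hm | hm
                · exact hnot hm
                · exact hk hm⟩
    · rw [if_neg hc]
      obtain ⟨ih2, ih1⟩ := ih p0 m
      constructor
      · rw [ih2]
        simp only [List.mem_cons]
        constructor
        · rintro (h | ⟨L', hL', hrest⟩)
          · exact Or.inl h
          · exact Or.inr ⟨L', Or.inr hL', hrest⟩
        · rintro (h | ⟨L', (rfl | hL'), hrest⟩)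
          · exact Or.inl h
          · -- the head length failed the test: then m = j + L is already in seen
            obtain ⟨hm, hn', hs'⟩ := hrest
            subst hm
            by_cases hsn : PySem.Set.contains p0.2 (j + L') = false
            · exact absurd ⟨hn', hsn, hs'⟩ hc
            · left
              rw [← PySem.Set.contains_iff]
              cases h : PySem.Set.contains p0.2 (j + L')
              · exact absurd h hsn
              · rfl
          · exact Or.inr ⟨L', hL', hrest⟩
      · rw [ih1]
        simp only [List.mem_cons]
        constructor
        · rintro (h | ⟨⟨L', hL', hrest⟩, hnot⟩)
          · exact Or.inl h
          · exact Or.inr ⟨⟨L', Or.inr hL', hrest⟩, hnot⟩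
        · rintro (h | ⟨⟨L', (rfl | hL'), hrest⟩, hnot⟩)
          · exact Or.inl h
          · obtain ⟨hm, hn', hs'⟩ := hrest
            subst hm
            by_cases hsn : PySem.Set.contains p0.2 (j + L') = false
            · exact absurd ⟨hn', hsn, hs'⟩ hc
            · exfalso
              apply hnot
              rw [← PySem.Set.contains_iff]
              cases h : PySem.Set.contains p0.2 (j + L')
              · exact absurd h hsn
              · rfl
          · exact Or.inr ⟨⟨L', hL', hrest⟩, hnot⟩

-- membership after a whole round
theorem pvRound_mem (strs : List String) (t : String) (n : ℤ)
    (frontier seen : PySem.Set Int) (m : ℤ) :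
    (m ∈ (pvRound strs t n frontier seen).2 ↔
      m ∈ seen ∨ ∃ j ∈ frontier, pvCondL strs t n j m) ∧
    (m ∈ (pvRound strs t n frontier seen).1 ↔
      (∃ j ∈ frontier, pvCondL strs t n j m) ∧ m ∉ seen) := by
  unfold pvRound pvCondL
  suffices h : ∀ (js : List ℤ) (p0 : PySem.Set Int × PySem.Set Int),
      (m ∈ (js.foldl (fun (p : PySem.Set Int × PySem.Set Int) j =>
        (PySem.Set.ofList (strs.map PySem.Str.len)).foldl (fun (p : PySem.Set Int × PySem.Set Int) L =>
          let k := j + L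
          if k ≤ n ∧ PySem.Set.contains p.2 k = false ∧
              PySem.Set.contains (PySem.Set.ofList strs) (PySem.Str.slice t (some j) (some k)) = true then
            (PySem.Set.add p.1 k, PySem.Set.add p.2 k)
          else p) p) p0).2 ↔
        m ∈ p0.2 ∨ ∃ j ∈ js, ∃ L ∈ PySem.Set.ofList (strs.map PySem.Str.len), m = j + L ∧ m ≤ n ∧
          PySem.Set.contains (PySem.Set.ofList strs) (PySem.Str.slice t (some j) (some m)) = true) ∧
      (m ∈ (js.foldl (fun (p : PySem.Set Int × PySem.Set Int) j =>
        (PySem.Set.ofList (strs.map PySem.Str.len)).foldl (fun (p : PySem.Set Int × PySem.Set Int) L =>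
          let k := j + L
          if k ≤ n ∧ PySem.Set.contains p.2 k = false ∧
              PySem.Set.contains (PySem.Set.ofList strs) (PySem.Str.slice t (some j) (some k)) = true then
            (PySem.Set.add p.1 k, PySem.Set.add p.2 k)
          else p) p) p0).1 ↔
        m ∈ p0.1 ∨ ((∃ j ∈ js, ∃ L ∈ PySem.Set.ofList (strs.map PySem.Str.len), m = j + L ∧ m ≤ n ∧
          PySem.Set.contains (PySem.Set.ofList strs) (PySem.Str.slice t (some j) (some m)) = true) ∧ m ∉ p0.2)) by
    obtain ⟨h2, h1⟩ := h frontier ((PySem.Set.empty : PySem.Set Int), seen)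
    constructor
    · exact h2
    · rw [h1]
      simp [PySem.Set.empty]
  intro js
  induction js with
  | nil => intro p0; constructor <;> simp
  | cons j js ih =>
    intro p0
    rw [List.foldl_cons]
    obtain ⟨in2, in1⟩ := pvRound_inner_mem strs t n j (PySem.Set.ofList (strs.map PySem.Str.len)) p0 m
    set p1 := (PySem.Set.ofList (strs.map PySem.Str.len)).foldl (fun (p : PySem.Set Int × PySem.Set Int) L =>
          let k := j + L
          if k ≤ n ∧ PySem.Set.contains p.2 k = false ∧
              PySem.Set.contains (PySem.Set.ofList strs) (PySem.Str.slice t (some j) (some k)) = true then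
            (PySem.Set.add p.1 k, PySem.Set.add p.2 k)
          else p) p0 with hp1
    obtain ⟨ih2, ih1⟩ := ih p1
    rw [in2] at ih2
    rw [in1, in2] at ih1
    constructor
    · rw [ih2]
      simp only [List.mem_cons]
      constructor
      · rintro ((h | h) | ⟨j', hj', h⟩)
        · exact Or.inl h
        · exact Or.inr ⟨j, Or.inl rfl, h⟩
        · exact Or.inr ⟨j', Or.inr hj', h⟩
      · rintro (h | ⟨j', (rfl | hj'), h⟩)
        · exact Or.inl (Or.inl h)
        · exact Or.inl (Or.inr h)
        · exact Or.inr ⟨j', hj', h⟩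
    · rw [ih1]
      simp only [List.mem_cons]
      constructor
      · rintro ((h | ⟨h, hnot⟩) | ⟨⟨j', hj', h⟩, hnot⟩)
        · exact Or.inl h
        · exact Or.inr ⟨⟨j, Or.inl rfl, h⟩, hnot⟩
        · exact Or.inr ⟨⟨j', Or.inr hj', h⟩, fun hm => hnot (Or.inl hm)⟩
      · rintro (h | ⟨⟨j', (rfl | hj'), h⟩, hnot⟩)
        · exact Or.inl (Or.inl h)
        · exact Or.inl (Or.inr ⟨h, hnot⟩)
        · by_cases hmem : m ∈ p0.2 ∨ ∃ L ∈ PySem.Set.ofList (strs.map PySem.Str.len), m = j + L ∧ m ≤ n ∧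
              PySem.Set.contains (PySem.Set.ofList strs) (PySem.Str.slice t (some j) (some m)) = true
          · rcases hmem with hm | hm
            · exact absurd hm hnot
            · exact Or.inl (Or.inr ⟨hm, hnot⟩)
          · push Not at hmem
            exact Or.inr ⟨⟨j', hj', h⟩, fun hm => by
              rcases hm with hm | hm
              · exact hmem.1 hm
              · obtain ⟨L, hL, hh⟩ := hm
                exact hmem.2 L hL hh.1 hh.2.1 hh.2.2⟩

-- the lengths-form condition is exactly pvCond once the source position is a real prefix position
theorem pvCondL_iff (strs : List String) (t : String) (j m : ℤ)
    (hj : 0 ≤ j) (hjN : j.toNat ≤ t.toList.length) :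
    pvCondL strs t ((t.toList.length : ℤ)) j m ↔ pvCond strs t ((t.toList.length : ℤ)) j m := by
  constructor
  · rintro ⟨L, hL, hm, hmn, hcont⟩
    obtain ⟨w', hw', hLw'⟩ := List.mem_map.mp ((PySem.Set.mem_ofList _ _).mp hL)
    have hL0 : 0 ≤ L := by
      rw [← hLw', PySem.Str.len_eq]
      positivity
    have hw := (PySem.Set.mem_ofList _ _).mp ((PySem.Set.contains_iff _ _).mp hcont)
    refine ⟨PySem.Str.slice t (some j) (some m), hw, ?_, hmn, rfl⟩
    have hlen : (PySem.Str.slice t (some j) (some m)).toList.length = m.toNat - j.toNat := by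
      rw [PySem.Str.toList_slice, PySem.Chars.slice_eq_listSlice,
        show j = ((j.toNat : ℕ) : ℤ) by omega, show m = ((m.toNat : ℕ) : ℤ) by omega,
        PySem.List.length_slice, PySem.List.clampIdx_natCast, PySem.List.clampIdx_natCast]
      omega
    rw [PySem.Str.len_eq, hlen]
    omega
  · rintro ⟨w, hw, hm, hmn, hs⟩
    refine ⟨PySem.Str.len w, (PySem.Set.mem_ofList _ _).mpr (List.mem_map.mpr ⟨w, hw, rfl⟩),
      hm, hmn, ?_⟩
    rw [hs]
    exact (PySem.Set.contains_iff _ _).mpr ((PySem.Set.mem_ofList _ _).mpr hw)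

def pvInvF (strs : List String) (t : String) (d : ℕ) (fr : PySem.Set Int) : Prop :=
  ∀ m : ℤ, m ∈ fr ↔ 0 ≤ m ∧ pvF strs t m.toNat = (((d : ℤ)) : WithTop ℤ)

def pvInvS (strs : List String) (t : String) (d : ℕ) (sn : PySem.Set Int) : Prop :=
  ∀ m : ℤ, m ∈ sn ↔ 0 ≤ m ∧ pvF strs t m.toNat ≤ (((d : ℤ)) : WithTop ℤ)

theorem pvCond_iff (strs : List String) (t : String) (j m : ℤ)
    (hj : 0 ≤ j) (hjN : j.toNat ≤ t.toList.length) :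
    pvCond strs t ((t.toList.length : ℤ)) j m ↔
      (m = j ∧ ∃ w ∈ strs, w.toList = []) ∨
      (0 ≤ m ∧ pvEdgeB strs t j.toNat m.toNat = true) := by
  constructor
  · rintro ⟨w, hw, hm, hmn, hs⟩
    have hlen : PySem.Str.len w = (w.toList.length : ℤ) := PySem.Str.len_eq w
    by_cases hwe : w.toList = []
    · left
      refine ⟨?_, w, hw, hwe⟩
      rw [hm, hlen, hwe]
      simp
    · right
      have hwl : 0 < w.toList.length := List.length_pos_iff.mpr hwe
      have hm0 : 0 ≤ m := by rw [hm, hlen]; omega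
      refine ⟨hm0, ?_⟩
      unfold pvEdgeB
      rw [List.any_eq_true]
      have hm' : m = j + (w.toList.length : ℤ) := by rw [hm, hlen]
      refine ⟨w, hw, decide_eq_true_iff.mpr ⟨by omega, by omega, ?_⟩⟩
      rw [Int.toNat_of_nonneg hj, Int.toNat_of_nonneg hm0]
      exact hs
  · rintro (⟨heq, w, hw, hwe⟩ | ⟨hm0, hedge⟩)
    · subst heq
      refine ⟨w, hw, ?_, ?_, ?_⟩
      · rw [PySem.Str.len_eq, hwe]; simp
      · omega
      · rw [← String.toList_inj, PySem.Str.toList_slice, PySem.Chars.slice_eq_listSlice, hwe]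
        have : (PySem.List.slice t.toList (some m) (some m)).length = 0 := by
          rw [PySem.List.length_slice]; omega
        exact List.eq_nil_of_length_eq_zero this
    · unfold pvEdgeB at hedge
      rw [List.any_eq_true] at hedge
      obtain ⟨w, hw, hdec⟩ := hedge
      rw [decide_eq_true_iff] at hdec
      obtain ⟨hw0, hmk, hs⟩ := hdec
      have hbd := pvEdgeB_bounds (show pvEdgeB strs t j.toNat m.toNat = true by
        unfold pvEdgeB; rw [List.any_eq_true]; exact ⟨w, hw, decide_eq_true_iff.mpr ⟨hw0, hmk, hs⟩⟩)
      refine ⟨w, hw, ?_, by omega, ?_⟩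
      · rw [PySem.Str.len_eq]; omega
      · rw [← Int.toNat_of_nonneg hj, ← Int.toNat_of_nonneg hm0]
        exact hs

theorem pvRound_inv (strs : List String) (t : String) (d : ℕ)
    (frontier seen : PySem.Set Int)
    (hF : pvInvF strs t d frontier) (hS : pvInvS strs t d seen) :
    pvInvF strs t (d+1) (pvRound strs t ((t.toList.length : ℤ)) frontier seen).1 ∧
    pvInvS strs t (d+1) (pvRound strs t ((t.toList.length : ℤ)) frontier seen).2 := by
  have hcast : (((d+1 : ℕ) : ℤ) : WithTop ℤ) = (((d:ℤ) + 1 : ℤ) : WithTop ℤ) := by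
    norm_cast
  constructor
  · intro m
    rw [(pvRound_mem strs t _ frontier seen m).2, hcast]
    constructor
    · rintro ⟨⟨j, hj, hc⟩, hnot⟩
      obtain ⟨hj0, hjF⟩ := (hF j).mp hj
      have hjN : j.toNat ≤ t.toList.length := pvF_finite_le (by rw [hjF]; simp)
      rw [pvCondL_iff strs t j m hj0 hjN, pvCond_iff strs t j m hj0 hjN] at hc
      rcases hc with ⟨heq, _⟩ | ⟨hm0, hedge⟩
      · subst heq
        exact absurd ((hS m).mpr ⟨hj0, le_of_eq hjF⟩) hnot
      · refine ⟨hm0, ?_⟩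
        have hnotle : ¬ pvF strs t m.toNat ≤ (((d:ℤ)) : WithTop ℤ) :=
          fun hle => hnot ((hS m).mpr ⟨hm0, hle⟩)
        exact (pvF_eq_succ_iff strs t m.toNat d).mpr ⟨hnotle, j.toNat, hjF, hedge⟩
    · rintro ⟨hm0, hFm⟩
      obtain ⟨hnotle, j, hFj, hedge⟩ := (pvF_eq_succ_iff strs t m.toNat d).mp hFm
      have hjN : j ≤ t.toList.length := pvF_finite_le (by rw [hFj]; simp)
      refine ⟨⟨(j:ℤ), (hF _).mpr ⟨by positivity, by simpa using hFj⟩, ?_⟩,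
        fun hm => hnotle (((hS m).mp hm).2)⟩
      rw [pvCondL_iff strs t (j:ℤ) m (by positivity) (by simpa using hjN),
        pvCond_iff strs t (j:ℤ) m (by positivity) (by simpa using hjN)]
      right
      exact ⟨hm0, by simpa using hedge⟩
  · intro m
    rw [(pvRound_mem strs t _ frontier seen m).1, hcast]
    constructor
    · rintro (hm | ⟨j, hj, hc⟩)
      · obtain ⟨hm0, hle⟩ := (hS m).mp hm
        exact ⟨hm0, le_trans hle (by rw [WithTop.coe_le_coe]; omega)⟩
      · obtain ⟨hj0, hjF⟩ := (hF j).mp hj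
        have hjN : j.toNat ≤ t.toList.length := pvF_finite_le (by rw [hjF]; simp)
        rw [pvCondL_iff strs t j m hj0 hjN, pvCond_iff strs t j m hj0 hjN] at hc
        rcases hc with ⟨heq, _⟩ | ⟨hm0, hedge⟩
        · subst heq
          exact ⟨hj0, le_trans (le_of_eq hjF) (by rw [WithTop.coe_le_coe]; omega)⟩
        · refine ⟨hm0, ?_⟩
          have := pvF_le_edge hedge
          rw [hjF] at this
          exact le_trans this (by rw [← WithTop.coe_one, ← WithTop.coe_add])
    · rintro ⟨hm0, hle⟩
      rcases (pvF_le_succ_iff (pvF strs t m.toNat) (d:ℤ)).mp hle with h | h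
      · exact Or.inl ((hS m).mpr ⟨hm0, h⟩)
      · obtain ⟨hnotle, j, hFj, hedge⟩ := (pvF_eq_succ_iff strs t m.toNat d).mp h
        have hjN : j ≤ t.toList.length := pvF_finite_le (by rw [hFj]; simp)
        refine Or.inr ⟨(j:ℤ), (hF _).mpr ⟨by positivity, by simpa using hFj⟩, ?_⟩
        rw [pvCondL_iff strs t (j:ℤ) m (by positivity) (by simpa using hjN),
        pvCond_iff strs t (j:ℤ) m (by positivity) (by simpa using hjN)]
        right
        exact ⟨hm0, by simpa using hedge⟩

theorem pvF_top_or_nat (strs : List String) (t : String) (i : ℕ) :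
    pvF strs t i = ⊤ ∨ ∃ e : ℕ, e ≤ i ∧ pvF strs t i = (((e:ℤ)) : WithTop ℤ) := by
  cases h : pvF strs t i with
  | top => exact Or.inl rfl
  | coe v =>
    have := pvF_bound h
    refine Or.inr ⟨v.toNat, by omega, ?_⟩
    norm_cast
    omega

theorem pvBfs_correct (strs : List String) (t : String) :
    ∀ (fuel d : ℕ) (frontier seen : PySem.Set Int),
    pvInvF strs t d frontier → pvInvS strs t d seen →
    t.toList.length + 2 ≤ fuel + d →
    (∀ e : ℕ, e < d → pvF strs t t.toList.length ≠ (((e : ℤ)) : WithTop ℤ)) →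
    pvBfs strs t ((t.toList.length : ℤ)) fuel frontier seen ((d : ℤ)) =
      WithTop.untopD (-1) (pvF strs t t.toList.length) := by
  intro fuel
  induction fuel with
  | zero =>
    intro d frontier seen _ _ hfd hlay
    rcases pvF_top_or_nat strs t t.toList.length with h | ⟨e, he, h⟩
    · rw [pvBfs, h]
      rfl
    · exact absurd h (hlay e (by omega))
  | succ fuel ih =>
    intro d frontier seen hF hS hfd hlay
    rw [pvBfs]
    by_cases hemp : frontier = ([] : List Int)
    · rw [if_pos hemp]
      rcases pvF_top_or_nat strs t t.toList.length with h | ⟨e, he, h⟩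
      · rw [h]; rfl
      · -- layer e is attained at N; every earlier layer is attained; but layer d is empty
        have hd : d ≤ e := by
          by_contra hlt
          exact absurd h (hlay e (by omega))
        obtain ⟨j, hj⟩ := pvF_layers strs t e t.toList.length h d hd
        have : (j:ℤ) ∈ frontier := (hF (j:ℤ)).mpr ⟨by positivity, by simpa using hj⟩
        rw [hemp] at this
        simp at this
    · rw [if_neg hemp]
      by_cases hn : PySem.Set.contains frontier ((t.toList.length : ℤ)) = true
      · rw [if_pos hn]
        have := (hF _).mp (PySem.Set.contains_iff frontier _ |>.mp hn)
        rw [show ((t.toList.length:ℤ)).toNat = t.toList.length by omega] at this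
        rw [this.2]
        rfl
      · rw [if_neg hn]
        have hnotmem : ((t.toList.length:ℤ)) ∉ frontier := fun hm =>
          hn ((PySem.Set.contains_iff frontier _).mpr hm)
        have hneq : pvF strs t t.toList.length ≠ (((d:ℤ)) : WithTop ℤ) := by
          intro h
          exact hnotmem ((hF _).mpr ⟨by positivity, by
            rw [show ((t.toList.length:ℤ)).toNat = t.toList.length by omega]; exact h⟩)
        obtain ⟨hF', hS'⟩ := pvRound_inv strs t d frontier seen hF hS
        have := ih (d+1) _ _ hF' hS' (by omega) (by
          intro e he
          rcases Nat.lt_or_ge e d with h | h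
          · exact hlay e h
          · obtain rfl : e = d := by omega
            exact hneq)
        rw [show ((d:ℤ) + 1) = (((d+1:ℕ):ℤ)) by push_cast; ring]
        exact this

theorem pySetD_pyGetD_self (dp : List (WithTop Int)) (i : Int) (h0 : 0 ≤ i) (h : i.toNat < dp.length) :
    PySem.List.pySetD dp i (PySem.List.pyGetD dp i ⊤) = dp := by
  rw [PySem.List.pySetD_of_nonneg dp _ h0, PySem.List.pyGetD_of_nonneg dp _ h0,
    List.getD_eq_getElem dp _ h]
  exact List.set_getElem_self ..

theorem min_self_add_one (v : WithTop Int) : min v (v + 1) = v :=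
  min_eq_left (le_add_of_nonneg_right (by decide))

theorem pySetD_pySetD (dp : List (WithTop Int)) (i : Int) (v w : WithTop Int) (h0 : 0 ≤ i) :
    PySem.List.pySetD (PySem.List.pySetD dp i v) i w = PySem.List.pySetD dp i w := by
  rw [PySem.List.pySetD_of_nonneg dp _ h0, PySem.List.pySetD_of_nonneg _ _ h0,
    PySem.List.pySetD_of_nonneg dp _ h0, List.set_set]

theorem gfoldMin {α : Type} (len : α → Int) (cond : α → Bool) (i : Int) (hi : 0 ≤ i)
    (hc : ∀ x, cond x = true → 0 ≤ i - len x)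
    (xs : List α) (dp : List (WithTop Int)) (hlen : i.toNat < dp.length) :
    xs.foldl (fun dp x => if cond x then PySem.List.pySetD dp i (min (PySem.List.pyGetD dp i ⊤) (PySem.List.pyGetD dp (i - len x) ⊤ + 1)) else dp) dp
    = PySem.List.pySetD dp i
        (((xs.filter (fun x => cond x && !(len x == 0))).map (fun x => PySem.List.pyGetD dp (i - len x) ⊤ + 1)).foldl min (PySem.List.pyGetD dp i ⊤)) := by
  induction xs generalizing dp with
  | nil => simp [pySetD_pyGetD_self dp i hi hlen]
  | cons x xs ih =>
    simp only [List.foldl_cons, List.filter_cons]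
    cases hcx : cond x with
    | false =>
      rw [if_neg (by simp), if_neg (by simp)]
      exact ih dp hlen
    | true =>
      by_cases hz : len x = 0
      · have hzz : i - len x = i := by omega
        rw [if_pos rfl, hzz, min_self_add_one, pySetD_pyGetD_self dp i hi hlen]
        simp only [hz, beq_self_eq_true, Bool.not_true, Bool.and_false,
          Bool.false_eq_true, if_false]
        exact ih dp hlen
      · set m := min (PySem.List.pyGetD dp i ⊤) (PySem.List.pyGetD dp (i - len x) ⊤ + 1) with hm
        set dp' := PySem.List.pySetD dp i m with hdp'
        have hlen' : i.toNat < dp'.length := by rw [hdp', PySem.List.length_pySetD]; exact hlen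
        rw [if_pos rfl, ih dp' hlen']
        have hget_eq : PySem.List.pyGetD dp' i ⊤ = m := by
          obtain ⟨n, rfl⟩ : ∃ n : ℕ, i = (n : ℤ) := ⟨i.toNat, (Int.toNat_of_nonneg hi).symm⟩
          rw [hdp', PySem.List.pyGetD_pySetD_natCast dp n n _ _ (by simpa using hlen)]
          simp
        have hget_ne : ∀ (j : ℤ), 0 ≤ j → j ≠ i → PySem.List.pyGetD dp' j ⊤ = PySem.List.pyGetD dp j ⊤ := by
          intro j hj hne
          obtain ⟨n, rfl⟩ : ∃ n : ℕ, i = (n : ℤ) := ⟨i.toNat, (Int.toNat_of_nonneg hi).symm⟩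
          obtain ⟨k, rfl⟩ : ∃ k : ℕ, j = (k : ℤ) := ⟨j.toNat, (Int.toNat_of_nonneg hj).symm⟩
          rw [hdp', PySem.List.pyGetD_pySetD_natCast dp n k _ _ (by simpa using hlen)]
          rw [if_neg (by exact_mod_cast hne)]
        have hmap : (xs.filter (fun y => cond y && !(len y == 0))).map (fun y => PySem.List.pyGetD dp' (i - len y) ⊤ + 1)
            = (xs.filter (fun y => cond y && !(len y == 0))).map (fun y => PySem.List.pyGetD dp (i - len y) ⊤ + 1) := by
          apply List.map_congr_left
          intro y hy
          have hyc' : cond y = true ∧ len y ≠ 0 := by simpa using List.of_mem_filter hy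
          rw [hget_ne (i - len y) (hc y hyc'.1) (by have := hyc'.2; omega)]
        rw [hmap, hget_eq, hdp', pySetD_pySetD dp i m _ hi]
        simp only [Bool.true_and]
        rw [if_pos (by simp [hz]), List.map_cons, List.foldl_cons]

def pvStep (d : PySem.Dict Int (PySem.Set String)) (s : String) : PySem.Dict Int (PySem.Set String) :=
  let length : Int := PySem.Str.len s
  let d := if d.contains length = false then d.insert length PySem.Set.empty else d
  d.modify length PySem.Set.empty (fun st => PySem.Set.add st s)

theorem pvStep_getD (d : PySem.Dict Int (PySem.Set String)) (s : String) (L : Int) (p : String) :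
    p ∈ (pvStep d s).getD L PySem.Set.empty ↔
      p ∈ d.getD L PySem.Set.empty ∨ (p = s ∧ PySem.Str.len s = L) := by
  unfold pvStep
  have hbase : (if d.contains (PySem.Str.len s) = false then d.insert (PySem.Str.len s) PySem.Set.empty else d).getD (PySem.Str.len s) PySem.Set.empty = d.getD (PySem.Str.len s) PySem.Set.empty := by
    split_ifs with hcon
    · rw [PySem.Dict.getD_insert, if_pos rfl, PySem.Dict.getD_of_not_contains d _ hcon]
    · rfl
  by_cases hL : L = PySem.Str.len s
  · subst hL
    rw [PySem.Dict.getD_modify, if_pos rfl, hbase, PySem.Set.mem_add]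
    tauto
  · rw [PySem.Dict.getD_modify, if_neg hL]
    split_ifs with hcon
    · rw [PySem.Dict.getD_insert, if_neg hL]
      tauto
    · tauto

theorem pvStep_keys (d : PySem.Dict Int (PySem.Set String)) (s : String) (L : Int) :
    L ∈ (pvStep d s).keys ↔ L = PySem.Str.len s ∨ L ∈ d.keys := by
  unfold pvStep
  rw [PySem.Dict.keys_modify, PySem.Dict.mem_keys_insert]
  split_ifs with hcon
  · rw [PySem.Dict.mem_keys_insert]
    tauto
  · tauto

theorem piecesByLen_aux_getD (strs : List String) :
    ∀ (d : PySem.Dict Int (PySem.Set String)) (L : Int) (p : String),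
    p ∈ (strs.foldl pvStep d).getD L PySem.Set.empty ↔
      p ∈ d.getD L PySem.Set.empty ∨ (p ∈ strs ∧ PySem.Str.len p = L) := by
  induction strs with
  | nil => simp
  | cons s strs ih =>
    intro d L p
    rw [List.foldl_cons, ih, pvStep_getD]
    constructor
    · rintro ((h | ⟨rfl, rfl⟩) | ⟨h1, h2⟩)
      · exact Or.inl h
      · exact Or.inr ⟨List.mem_cons_self, rfl⟩
      · exact Or.inr ⟨List.mem_cons_of_mem _ h1, h2⟩
    · rintro (h | ⟨h1, h2⟩)
      · exact Or.inl (Or.inl h)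
      · rcases List.mem_cons.mp h1 with rfl | h1
        · exact Or.inl (Or.inr ⟨rfl, h2⟩)
        · exact Or.inr ⟨h1, h2⟩

theorem piecesByLen_aux_keys (strs : List String) :
    ∀ (d : PySem.Dict Int (PySem.Set String)) (L : Int),
    L ∈ (strs.foldl pvStep d).keys ↔ L ∈ d.keys ∨ ∃ s ∈ strs, PySem.Str.len s = L := by
  induction strs with
  | nil => simp
  | cons s strs ih =>
    intro d L
    rw [List.foldl_cons, ih, pvStep_keys]
    constructor
    · rintro ((rfl | h) | ⟨w, hw, hlen⟩)
      · exact Or.inr ⟨s, List.mem_cons_self, rfl⟩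
      · exact Or.inl h
      · exact Or.inr ⟨w, List.mem_cons_of_mem _ hw, hlen⟩
    · rintro (h | ⟨w, hw, hlen⟩)
      · exact Or.inl (Or.inr h)
      · rcases List.mem_cons.mp hw with rfl | hw
        · exact Or.inl (Or.inl hlen.symm)
        · exact Or.inr ⟨w, hw, hlen⟩

theorem piecesByLen_getD (strs : List String) (L : Int) (p : String) :
    p ∈ (pvPiecesByLen strs).getD L PySem.Set.empty ↔ p ∈ strs ∧ PySem.Str.len p = L := by
  rw [show pvPiecesByLen strs = strs.foldl pvStep PySem.Dict.empty from rfl,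
    piecesByLen_aux_getD]
  simp [PySem.Dict.getD_empty, PySem.Set.empty]

theorem piecesByLen_keys (strs : List String) (L : Int) :
    L ∈ (pvPiecesByLen strs).keys ↔ ∃ s ∈ strs, PySem.Str.len s = L := by
  rw [show pvPiecesByLen strs = strs.foldl pvStep PySem.Dict.empty from rfl,
    piecesByLen_aux_keys]
  simp [PySem.Dict.keys_empty]

def pvStepA (strs : List String) (t : String) (dp : List (WithTop Int)) (i : Int) : List (WithTop Int) :=
  (pvPiecesByLen strs).keys.foldl (fun dp length =>
    if length ≤ i then
      let piece := PySem.Str.slice t (some (i - length)) (some i)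
      if ((pvPiecesByLen strs).getD length PySem.Set.empty).contains piece then
        PySem.List.pySetD dp i (min (PySem.List.pyGetD dp i ⊤) (PySem.List.pyGetD dp (i - length) ⊤ + 1))
      else dp
    else dp) dp

-- the candidate values of A's inner loop at position a coincide with pvF's defining candidates

theorem pvCandsA_mem (strs : List String) (t : String) (a : ℕ) (dp : List (WithTop Int))
    (hget : ∀ r : ℕ, r < a → PySem.List.pyGetD dp (r : ℤ) ⊤ = pvF strs t r) (v : WithTop Int) :
    (v ∈ (((pvPiecesByLen strs).keys.filter (fun L => (decide (L ≤ (a:ℤ)) && ((pvPiecesByLen strs).getD L PySem.Set.empty).contains (PySem.Str.slice t (some ((a:ℤ) - L)) (some (a:ℤ)))) && !(L == 0))).map (fun L => PySem.List.pyGetD dp ((a:ℤ) - L) ⊤ + 1)))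
    ↔ v ∈ (((List.range a).filter (fun j => pvEdgeB strs t j a)).map (fun j => pvF strs t j + 1)) := by
  simp only [List.mem_map, List.mem_filter, List.mem_range, Bool.and_eq_true, decide_eq_true_eq,
    Bool.not_eq_eq_eq_not, Bool.not_true, beq_eq_false_iff_ne, ne_eq]
  constructor
  · rintro ⟨L, ⟨hLk, ⟨hLa, hLmem⟩, hL0⟩, hv⟩
    obtain ⟨hpmem, hplen⟩ := (piecesByLen_getD strs L _).mp ((PySem.Set.contains_iff _ _).mp hLmem)
    have hlenL : L = ((PySem.Str.slice t (some ((a:ℤ) - L)) (some (a:ℤ))).toList.length : ℤ) := by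
      rw [← PySem.Str.len_eq, hplen]
    set w := PySem.Str.slice t (some ((a:ℤ) - L)) (some (a:ℤ)) with hw
    have hL0' : (0:ℤ) < L := by
      rcases lt_or_eq_of_le (show (0:ℤ) ≤ L by rw [hlenL]; positivity) with h | h
      · exact h
      · exact absurd h.symm hL0
    set j : ℕ := a - L.toNat with hj
    have hcast : ((a:ℤ) - L) = (j : ℤ) := by omega
    refine ⟨j, ⟨by omega, ?_⟩, ?_⟩
    · unfold pvEdgeB
      rw [List.any_eq_true]
      refine ⟨w, hpmem, decide_eq_true_iff.mpr ⟨by omega, by omega, ?_⟩⟩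
      rw [← hcast, ← hw]
    · rw [← hv, hcast, hget j (by omega)]
  · rintro ⟨j, ⟨hja, hedge⟩, hv⟩
    unfold pvEdgeB at hedge
    rw [List.any_eq_true] at hedge
    obtain ⟨w, hwmem, hdec⟩ := hedge
    rw [decide_eq_true_iff] at hdec
    obtain ⟨hw0, haj, hs⟩ := hdec
    set L : ℤ := PySem.Str.len w with hL
    have hlenw : L = (w.toList.length : ℤ) := PySem.Str.len_eq w
    have hcast : ((a:ℤ) - L) = (j : ℤ) := by omega
    refine ⟨L, ⟨(piecesByLen_keys strs L).mpr ⟨w, hwmem, rfl⟩, ⟨by omega, ?_⟩, by omega⟩, ?_⟩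
    · refine (PySem.Set.contains_iff _ _).mpr ((piecesByLen_getD strs L _).mpr ⟨?_, ?_⟩)
      · rw [hcast, hs]
        exact hwmem
      · rw [hcast, hs]
    · rw [hcast, hget j hja, hv]

theorem pvStepA_eq (strs : List String) (t : String) (a : ℕ) (dp : List (WithTop Int))
    (ha : 1 ≤ a) (hlen : a < dp.length)
    (hget : ∀ r : ℕ, r < a → PySem.List.pyGetD dp (r : ℤ) ⊤ = pvF strs t r)
    (htop : PySem.List.pyGetD dp (a:ℤ) ⊤ = ⊤) :
    pvStepA strs t dp (a:ℤ) = PySem.List.pySetD dp (a:ℤ) (pvF strs t a) := by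
  unfold pvStepA
  have hA : (fun (dp : List (WithTop Int)) (length : Int) =>
      if length ≤ (a:ℤ) then
        let piece := PySem.Str.slice t (some ((a:ℤ) - length)) (some (a:ℤ))
        if ((pvPiecesByLen strs).getD length PySem.Set.empty).contains piece then
          PySem.List.pySetD dp (a:ℤ) (min (PySem.List.pyGetD dp (a:ℤ) ⊤) (PySem.List.pyGetD dp ((a:ℤ) - length) ⊤ + 1))
        else dp
      else dp)
      = (fun (dp : List (WithTop Int)) (x : Int) =>
      if (fun (L : Int) => decide (L ≤ (a:ℤ)) && ((pvPiecesByLen strs).getD L PySem.Set.empty).contains (PySem.Str.slice t (some ((a:ℤ) - L)) (some (a:ℤ)))) x then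
        PySem.List.pySetD dp (a:ℤ) (min (PySem.List.pyGetD dp (a:ℤ) ⊤) (PySem.List.pyGetD dp ((a:ℤ) - (fun (L : Int) => L) x) ⊤ + 1))
      else dp) := by
    funext dp L
    by_cases h : L ≤ (a:ℤ)
    · simp only [h, if_pos, decide_true, Bool.true_and]
    · simp [h]
  rw [hA, gfoldMin (fun (L : Int) => L) _ (a:ℤ) (by positivity)
      (fun x hx => by
        simp only [Bool.and_eq_true, decide_eq_true_eq] at hx
        show 0 ≤ (a:ℤ) - x
        omega) _ dp (by simpa using hlen)]
  congr 1
  rw [htop]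
  obtain ⟨m, rfl⟩ : ∃ m, a = m + 1 := ⟨a - 1, by omega⟩
  rw [pvF_succ]
  exact foldl_min_eq_of_mem_iff _ _ _ (fun v => pvCandsA_mem strs t (m+1) dp hget v)

theorem pvLoopA (strs : List String) (t : String) : ∀ (k a : ℕ) (dp : List (WithTop Int)),
    a + k = t.toList.length + 1 → 1 ≤ a →
    dp.length = t.toList.length + 1 →
    (∀ r : ℕ, r ≤ t.toList.length →
      PySem.List.pyGetD dp (r : ℤ) ⊤ = (if r < a then pvF strs t r else ⊤)) →
    ∀ r : ℕ, r ≤ t.toList.length →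
      PySem.List.pyGetD ((PySem.List.pyRange (a:ℤ) ((t.toList.length:ℤ) + 1) 1).foldl (pvStepA strs t) dp) (r:ℤ) ⊤ = pvF strs t r := by
  intro k
  induction k with
  | zero =>
    intro a dp hak ha hlen hget r hr
    have hemp : PySem.List.pyRange (a:ℤ) ((t.toList.length:ℤ) + 1) 1 = [] := by
      have : ∀ x, x ∉ PySem.List.pyRange (a:ℤ) ((t.toList.length:ℤ) + 1) 1 := by
        intro x hx
        have := PySem.List.mem_pyRange_one.mp hx
        omega
      exact List.eq_nil_iff_forall_not_mem.mpr this
    rw [hemp, List.foldl_nil, hget r hr, if_pos (by omega)]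
  | succ k ih =>
    intro a dp hak ha hlen hget r hr
    rw [PySem.List.pyRange_one_cons (by omega), List.foldl_cons]
    rw [pvStepA_eq strs t a dp ha (by omega)
      (fun r hra => by rw [hget r (by omega), if_pos hra])
      (by rw [hget a (by omega), if_neg (by omega)])]
    rw [show ((a:ℤ) + 1) = (((a+1:ℕ)):ℤ) by push_cast; ring]
    refine ih (a+1) _ (by omega) (by omega) (by rw [PySem.List.length_pySetD]; omega) ?_ r hr
    intro r' hr'
    rw [PySem.List.pyGetD_pySetD_natCast dp a r' _ _ (by omega)]
    by_cases hra : r' = a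
    · rw [if_pos hra, hra, if_pos (by omega)]
    · rw [if_neg hra, hget r' hr']
      by_cases h2 : r' < a
      · rw [if_pos h2, if_pos (by omega)]
      · rw [if_neg h2, if_neg (by omega)]

theorem solution_alt_eq (strs : List String) (t : String) :
    solution_alt strs t = WithTop.untopD (-1) (pvF strs t t.toList.length) := by
  unfold solution_alt
  have hn : PySem.Str.len t = ((t.toList.length : ℤ)) := PySem.Str.len_eq t
  rw [hn]
  have hzero : ∀ m : ℤ, m ∈ (PySem.Set.add (PySem.Set.empty : PySem.Set Int) 0) ↔ m = 0 := by
    intro m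
    rw [PySem.Set.mem_add]
    simp [PySem.Set.empty]
  have hF0 : pvInvF strs t 0 (PySem.Set.add (PySem.Set.empty : PySem.Set Int) 0) := by
    intro m
    rw [hzero m]
    constructor
    · rintro rfl
      refine ⟨le_refl 0, ?_⟩
      rw [show ((0:ℤ)).toNat = 0 from rfl, pvF]
      simp
    · rintro ⟨hm0, hFm⟩
      have : m.toNat = 0 := (pvF_zero_iff strs t m.toNat).mp (by rw [hFm]; simp)
      omega
  have hS0 : pvInvS strs t 0 (PySem.Set.add (PySem.Set.empty : PySem.Set Int) 0) := by
    intro m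
    rw [hzero m]
    constructor
    · rintro rfl
      refine ⟨le_refl 0, ?_⟩
      rw [show ((0:ℤ)).toNat = 0 from rfl, pvF]
      simp
    · rintro ⟨hm0, hFm⟩
      have : m.toNat = 0 := (pvF_zero_iff strs t m.toNat).mp (by simpa using hFm)
      omega
  have := pvBfs_correct strs t (((t.toList.length : ℤ)).toNat + 2) 0 _ _ hF0 hS0 (by omega)
    (by intro e he; omega)
  simpa using this

-- ========== A side ==========

theorem solution_eq (strs : List String) (t : String) :
    solution strs t = WithTop.untopD (-1) (pvF strs t t.toList.length) := by
  have hn : PySem.Str.len t = ((t.toList.length : ℤ)) := PySem.Str.len_eq t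
  have hdp0 : PySem.List.pySetD (List.replicate (PySem.Str.len t + 1).toNat (⊤ : WithTop Int)) 0 (0 : WithTop Int)
      = (0 : WithTop Int) :: List.replicate t.toList.length (⊤ : WithTop Int) := by
    rw [PySem.List.pySetD_of_nonneg _ _ (le_refl 0), hn]
    rw [show ((t.toList.length:ℤ) + 1).toNat = t.toList.length + 1 by omega, List.replicate_succ]
    rfl
  have hget0 : ∀ r : ℕ, r ≤ t.toList.length →
      PySem.List.pyGetD ((0 : WithTop Int) :: List.replicate t.toList.length (⊤ : WithTop Int)) (r:ℤ) ⊤ =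
        (if r < 1 then pvF strs t r else ⊤) := by
    intro r hr
    rw [PySem.List.pyGetD_natCast]
    match r with
    | 0 =>
      rw [if_pos (by omega), pvF]
      rfl
    | r+1 =>
      rw [if_neg (by omega), List.getD_cons_succ, List.getD_replicate _ (by omega)]
  have hfin := pvLoopA strs t t.toList.length 1
    ((0 : WithTop Int) :: List.replicate t.toList.length (⊤ : WithTop Int))
    (by omega) (le_refl 1)
    (by rw [List.length_cons, List.length_replicate])
    hget0 t.toList.length (le_refl _)
  rw [Nat.cast_one] at hfin
  show WithTop.untopD (-1) (PySem.List.pyGetD ((PySem.List.pyRange 1 (PySem.Str.len t + 1) 1).foldl (pvStepA strs t)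
      (PySem.List.pySetD (List.replicate (PySem.Str.len t + 1).toNat (⊤ : WithTop Int)) 0 (0 : WithTop Int))) (PySem.Str.len t) ⊤)
    = WithTop.untopD (-1) (pvF strs t t.toList.length)
  rw [hdp0, hn, hfin]

-- ===== VERDICT (by name: the statement is the Claim_ definition above) =====
theorem solution_spec : Claim_equal_solution := by
  intro strs t _
  unfold Spec_solution
  rw [solution_eq, solution_alt_eq]
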